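-- pv_equiv track=rewrite | github.com/brezam/project-euler | python/euler21-30/euler28.py | table_diagonals
-- ===== SOURCE A (Python) =====
-- def table_diagonals(size):
--     step = number = 1
--     diagonals = [1]
--     for _ in range(size // 2):
--         for _ in range(4):
--             number += step + 1
--             diagonals.append(number)
--         step += 2
--     return diagonals
-- ===== SOURCE B (Python) =====
-- def table_diagonals(size):
--     diagonals = [1]
--     for m in range(1, size // 2 + 1):
--         sq = (2 * m + 1) ** 2
--         diagonals.extend([sq - 6 * m, sq - 4 * m, sq - 2 * m, sq])
--     return diagonals
-- ===== Notes on version B (the rewrite author's own statement) =====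
-- stated objective: simpler
-- what changed: Replaced the stateful step/number accumulators (inner 4-iteration loop mutating a running counter) by a per-ring closed form: for ring m the four corners are (2m+1)^2 - 6m, -4m, -2m, and (2m+1)^2, appended directly.
import Mathlib
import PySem

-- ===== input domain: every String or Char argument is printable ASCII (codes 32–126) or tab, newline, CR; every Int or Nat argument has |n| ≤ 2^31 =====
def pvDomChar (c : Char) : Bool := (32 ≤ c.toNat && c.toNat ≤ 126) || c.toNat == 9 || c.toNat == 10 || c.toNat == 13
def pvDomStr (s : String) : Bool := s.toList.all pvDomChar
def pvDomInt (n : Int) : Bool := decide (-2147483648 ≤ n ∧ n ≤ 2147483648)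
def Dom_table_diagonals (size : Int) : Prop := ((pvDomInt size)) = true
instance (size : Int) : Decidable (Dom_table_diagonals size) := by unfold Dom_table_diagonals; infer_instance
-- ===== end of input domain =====

-- B drops A's running step/number accumulators in favour of a per-ring closed form; objective: simpler.

-- ===== PORT A =====
-- loop body of A's outer ring loop: runs the inner 4-iteration loop mutating (number, diagonals), then step += 2
def stepA (s : Int × Int × List Int) (_ : Int) : Int × Int × List Int :=
  let inner := (PySem.List.pyRange 0 4 1).foldl
    (fun (t : Int × List Int) _ => (t.1 + s.1 + 1, t.2 ++ [t.1 + s.1 + 1])) (s.2.1, s.2.2)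
  (s.1 + 2, inner.1, inner.2)

def table_diagonals (size : Int) : List Int :=
  ((PySem.List.pyRange 0 (PySem.Int.floordiv size 2) 1).foldl stepA (1, 1, [1])).2.2

-- ===== PORT B =====
-- loop body of B's ring loop: appends the four corner values of ring m computed in closed form
def stepB (acc : List Int) (m : Int) : List Int :=
  let sq := (2 * m + 1) ^ 2
  acc ++ [sq - 6 * m, sq - 4 * m, sq - 2 * m, sq]

def table_diagonals_alt (size : Int) : List Int :=
  (PySem.List.pyRange 1 (PySem.Int.floordiv size 2 + 1) 1).foldl stepB [1]

-- ===== PRECONDITION & SPEC =====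
def Spec_table_diagonals (size : Int) (out : List Int) : Prop := out = table_diagonals_alt size
instance (size : Int) (out : List Int) : Decidable (Spec_table_diagonals size out) := by unfold Spec_table_diagonals; infer_instance

-- ===== CLAIM (what is proved, stated in full; the proofs are below) =====
def Claim_equal_table_diagonals : Prop := ∀ (size : Int), Dom_table_diagonals size → Spec_table_diagonals size (table_diagonals size)

-- ===== LEMMAS AND PROOFS =====

-- after k rings, A's state is (2k+1, (2k+1)^2, B's list after k rings)
lemma table_diagonals_key (k : Nat) :
    (PySem.List.pyRange 0 (k : Int) 1).foldl stepA (1, 1, [1])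
      = (2 * (k : Int) + 1, (2 * (k : Int) + 1) ^ 2,
         (PySem.List.pyRange 1 ((k : Int) + 1) 1).foldl stepB [1]) := by
  induction k with
  | zero => simp [PySem.List.pyRange_one_eq_nil]
  | succ k ih =>
    have hk : ((k + 1 : Nat) : Int) = (k : Int) + 1 := by push_cast; ring
    rw [hk,
      PySem.List.pyRange_one_succ_right (a := 0) (b := (k : Int)) (by positivity),
      PySem.List.pyRange_one_succ_right (a := 1) (b := (k : Int) + 1) (by omega),
      List.foldl_append, List.foldl_append, ih]
    have h4 : PySem.List.pyRange 0 4 1 = [0, 1, 2, 3] := by decide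
    simp only [List.foldl, stepA, stepB, h4]
    simp only [Prod.mk.injEq]
    refine ⟨by ring, by ring, ?_⟩
    simp only [List.append_assoc, List.cons_append, List.nil_append]
    congr 1
    simp only [List.cons.injEq, and_true]
    refine ⟨by ring, by ring, by ring, by ring⟩

-- ===== VERDICT (by name: the statement is the Claim_ definition above) =====
theorem table_diagonals_spec : Claim_equal_table_diagonals := by
  intro size _
  unfold Spec_table_diagonals table_diagonals table_diagonals_alt
  set n := PySem.Int.floordiv size 2 with hn
  by_cases h : 0 ≤ n
  · obtain ⟨k, hk⟩ := Int.eq_ofNat_of_zero_le h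
    rw [hk, table_diagonals_key]
  · rw [PySem.List.pyRange_one_eq_nil (by omega), PySem.List.pyRange_one_eq_nil (by omega)]
    rfl
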